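-- pv_equiv track=rewrite | github.com/skyoxu/lastking | scripts/sc/_active_task_sidecar.py | _derive_step_summary
-- ===== SOURCE A (Python) =====
-- from typing import Any
--
-- def _derive_step_summary(summary: dict[str, Any]) -> dict[str, str]:
--     steps = summary.get("steps")
--     if not isinstance(steps, list):
--         return {"latest_step": "", "latest_step_status": "", "failed_step": "", "last_completed_step": ""}
--     latest_step = ""
--     latest_step_status = ""
--     failed_step = ""
--     last_completed = ""
--     for item in steps:
--         if not isinstance(item, dict):
--             continue
--         name = str(item.get("name") or "").strip()
--         status = str(item.get("status") or "").strip()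
--         if name:
--             latest_step = name
--             latest_step_status = status
--         if not failed_step and status == "fail":
--             failed_step = name
--         if status == "ok":
--             last_completed = name
--     return {
--         "latest_step": latest_step,
--         "latest_step_status": latest_step_status,
--         "failed_step": failed_step,
--         "last_completed_step": last_completed,
--     }
-- ===== SOURCE B (Python) =====
-- def _derive_step_summary(summary):
--     steps = summary.get("steps")
--     if not isinstance(steps, list):
--         return {"latest_step": "", "latest_step_status": "", "failed_step": "", "last_completed_step": ""}
--     pairs = [(str(d.get("name") or "").strip(), str(d.get("status") or "").strip())
--              for d in steps if isinstance(d, dict)]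
--     latest = next(((n, s) for n, s in reversed(pairs) if n), ("", ""))
--     failed = next((n for n, s in pairs if s == "fail" and n), "")
--     last_ok = next((n for n, s in reversed(pairs) if s == "ok"), "")
--     return {"latest_step": latest[0], "latest_step_status": latest[1],
--             "failed_step": failed, "last_completed_step": last_ok}
-- ===== Notes on version B (the rewrite author's own statement) =====
-- stated objective: alternative
-- what changed: Replaces the single stateful loop with four accumulators by a comprehension building cleaned (name,status) pairs followed by three independent first/last-match scans (next over pairs / reversed(pairs)).
import Mathlib
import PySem

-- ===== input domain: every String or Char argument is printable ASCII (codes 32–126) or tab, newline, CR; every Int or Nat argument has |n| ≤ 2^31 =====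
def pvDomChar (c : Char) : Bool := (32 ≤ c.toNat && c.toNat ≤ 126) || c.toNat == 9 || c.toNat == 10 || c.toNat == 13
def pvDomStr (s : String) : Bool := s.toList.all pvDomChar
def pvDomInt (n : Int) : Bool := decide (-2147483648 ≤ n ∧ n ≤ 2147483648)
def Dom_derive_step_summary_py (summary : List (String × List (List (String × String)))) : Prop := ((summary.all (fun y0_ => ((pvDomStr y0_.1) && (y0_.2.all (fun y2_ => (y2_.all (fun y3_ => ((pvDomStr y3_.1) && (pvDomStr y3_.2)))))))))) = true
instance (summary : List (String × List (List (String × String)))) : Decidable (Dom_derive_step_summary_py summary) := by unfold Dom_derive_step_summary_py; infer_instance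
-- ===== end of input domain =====

-- B replaces A's single stateful four-accumulator loop by one cleaning pass plus three
-- independent first/last-match scans over the cleaned pairs (objective: alternative).

-- ===== PORT A =====
-- one loop iteration of A's for-loop (acc = (latest_step, latest_step_status, failed_step, last_completed))
def pvStepA (acc : String × String × String × String) (item : List (String × String)) :
    String × String × String × String :=
  let name := PySem.Str.strip ((PySem.Dict.mk item).getD "name" "")
  let status := PySem.Str.strip ((PySem.Dict.mk item).getD "status" "")
  let latest := if name ≠ "" then name else acc.1
  let lstat := if name ≠ "" then status else acc.2.1
  let failed := if acc.2.2.1 = "" ∧ status = "fail" then name else acc.2.2.1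
  let lastc := if status = "ok" then name else acc.2.2.2
  (latest, lstat, failed, lastc)

def derive_step_summary_py (summary : List (String × List (List (String × String)))) : List (String × String) :=
  match (PySem.Dict.mk summary).get? "steps" with
  | none => [("latest_step", ""), ("latest_step_status", ""), ("failed_step", ""), ("last_completed_step", "")]
  | some steps =>
    let r := steps.foldl pvStepA ("", "", "", "")
    [("latest_step", r.1), ("latest_step_status", r.2.1),
     ("failed_step", r.2.2.1), ("last_completed_step", r.2.2.2)]

-- ===== PORT B =====
def derive_step_summary_py_alt (summary : List (String × List (List (String × String)))) : List (String × String) :=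
  match (PySem.Dict.mk summary).get? "steps" with
  | none => [("latest_step", ""), ("latest_step_status", ""), ("failed_step", ""), ("last_completed_step", "")]
  | some steps =>
    let pairs := steps.map (fun d =>
      (PySem.Str.strip ((PySem.Dict.mk d).getD "name" ""), PySem.Str.strip ((PySem.Dict.mk d).getD "status" "")))
    let latest := (pairs.reverse.find? (fun p => p.1 != "")).getD ("", "")
    let failed := ((pairs.find? (fun p => p.2 == "fail" && p.1 != "")).map Prod.fst).getD ""
    let lastok := ((pairs.reverse.find? (fun p => p.2 == "ok")).map Prod.fst).getD ""
    [("latest_step", latest.1), ("latest_step_status", latest.2),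
     ("failed_step", failed), ("last_completed_step", lastok)]

-- ===== PRECONDITION & SPEC =====
def Spec_derive_step_summary_py (summary : List (String × List (List (String × String)))) (out : List (String × String)) : Prop := out = derive_step_summary_py_alt summary
instance (summary : List (String × List (List (String × String)))) (out : List (String × String)) : Decidable (Spec_derive_step_summary_py summary out) := by unfold Spec_derive_step_summary_py; infer_instance

-- ===== CLAIM (what is proved, stated in full; the proofs are below) =====
def Claim_equal_derive_step_summary_py : Prop := ∀ (summary : List (String × List (List (String × String)))), Dom_derive_step_summary_py summary → Spec_derive_step_summary_py summary (derive_step_summary_py summary)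

-- ===== LEMMAS AND PROOFS =====

-- A's loop body expressed on a cleaned (name, status) pair
def pvG (acc : String × String × String × String) (p : String × String) :
    String × String × String × String :=
  (if p.1 ≠ "" then p.1 else acc.1,
   if p.1 ≠ "" then p.2 else acc.2.1,
   if acc.2.2.1 = "" ∧ p.2 = "fail" then p.1 else acc.2.2.1,
   if p.2 = "ok" then p.1 else acc.2.2.2)

def pvClean (d : List (String × String)) : String × String :=
  (PySem.Str.strip ((PySem.Dict.mk d).getD "name" ""), PySem.Str.strip ((PySem.Dict.mk d).getD "status" ""))

-- characterization of A's fold over cleaned pairs by three independent first/last-match scans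
lemma pvFold_char (ps : List (String × String)) (l ls f c : String) :
    ps.foldl pvG (l, ls, f, c) =
      (((ps.reverse.find? (fun p => p.1 != "")).getD (l, ls)).1,
       ((ps.reverse.find? (fun p => p.1 != "")).getD (l, ls)).2,
       (if f = "" then ((ps.find? (fun p => p.2 == "fail" && p.1 != "")).map Prod.fst).getD f else f),
       ((ps.reverse.find? (fun p => p.2 == "ok")).map Prod.fst).getD c) := by
  induction ps generalizing l ls f c with
  | nil => simp
  | cons p ps ih =>
    cases p with
    | mk n s =>
      simp only [List.foldl_cons, List.reverse_cons, List.find?_append, List.find?_cons]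
      rw [ih]
      simp only [pvG, Prod.mk.injEq]
      refine ⟨?_, ?_, ?_, ?_⟩
      · cases h1 : ps.reverse.find? (fun p => p.1 != "") with
        | some q => simp [Option.or]
        | none =>
          by_cases hn : n = ""
          · have hb : (n != "") = false := by simp [hn]
            simp [hb, hn, Option.or]
          · have hb : (n != "") = true := by simp [hn]
            simp [hb, hn, Option.or]
      · cases h1 : ps.reverse.find? (fun p => p.1 != "") with
        | some q => simp [Option.or]
        | none =>
          by_cases hn : n = ""
          · have hb : (n != "") = false := by simp [hn]
            simp [hb, hn, Option.or]
          · have hb : (n != "") = true := by simp [hn]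
            simp [hb, hn, Option.or]
      · by_cases hf : f = ""
        · by_cases hq : s = "fail" ∧ n ≠ ""
          · have hb2 : (n != "") = true := by simp [hq.2]
            simp [hf, hq.1, hq.2, hb2]
          · have hb : (s == "fail" && n != "") = false := by
              rcases not_and_or.mp hq with h | h
              · simp [h]
              · simp [not_not.mp h]
            by_cases hs : s = "fail"
            · have hn : n = "" := by
                rcases not_and_or.mp hq with h | h
                · exact absurd hs h
                · exact not_not.mp h
              simp [hf, hs, hn]
            · simp [hf, hs, hb]
        · simp [hf]
      · cases h3 : ps.reverse.find? (fun p => p.2 == "ok") with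
        | some q => simp [Option.or]
        | none =>
          by_cases ho : s = "ok"
          · have hb : (s == "ok") = true := by simp [ho]
            simp [hb, ho, Option.or]
          · have hb : (s == "ok") = false := by simp [ho]
            simp [hb, ho, Option.or]

-- ===== VERDICT (by name: the statement is the Claim_ definition above) =====
theorem derive_step_summary_py_spec : Claim_equal_derive_step_summary_py := by
  intro summary _
  unfold Spec_derive_step_summary_py derive_step_summary_py derive_step_summary_py_alt
  cases h : (PySem.Dict.mk summary).get? "steps" with
  | none => rfl
  | some steps =>
    simp only []
    have hmap : steps.foldl pvStepA ("", "", "", "") = (steps.map pvClean).foldl pvG ("", "", "", "") := by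
      rw [List.foldl_map]; rfl
    rw [hmap, pvFold_char]
    have hfun : (fun d : List (String × String) =>
        (PySem.Str.strip ((PySem.Dict.mk d).getD "name" ""),
         PySem.Str.strip ((PySem.Dict.mk d).getD "status" ""))) = pvClean := rfl
    simp only [hfun]
    rfl
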